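-- pv_equiv track=rewrite | github.com/miliar/Code_Jam_Webscraper | solutions_python/Problem_149/74.py | solver2
-- ===== SOURCE A (Python) =====
-- def solver2(n, nums, swaps=0):
--     # debug("swaps", swaps)
--     # debug("nums", nums)
--     if n == 0:
--         return swaps
--     smallest = min(nums)
--     smallest_idx = nums.index(smallest)
--     # debug("smallest", smallest, "smallest_idx", smallest_idx)
--     swaps += min(smallest_idx - 0, (n - 1) - smallest_idx)
--     nums.remove(smallest)
--     return solver2(n - 1, nums, swaps)
-- ===== SOURCE B (Python) =====
-- def solver2(n, nums, swaps=0):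
--     # Sort original indices once by (value, index); the cost of the t-th
--     # removal is reconstructed from original indices (an element's current
--     # index is its original index minus the earlier removals to its left).
--     # Mutates nums like the original: the n smallest elements are removed.
--     m = len(nums)
--     order = sorted(range(m), key=lambda i: (nums[i], i))
--     picked = order[:n]
--     total = swaps
--     for t, i in enumerate(picked):
--         cur = i - sum(1 for j in picked[:t] if j < i)
--         total += min(cur, (n - 1 - t) - cur)
--     keep = set(picked)
--     nums[:] = [x for i, x in enumerate(nums) if i not in keep]
--     return total
-- ===== Notes on version B (the rewrite author's own statement) =====
-- stated objective: alternative
-- what changed: replaces the repeated min/index/remove recursion by a single sort of the original indices by (value, index), reconstructing each removal's current position as its original index minus a prefix count of earlier removals to its left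
import Mathlib
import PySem

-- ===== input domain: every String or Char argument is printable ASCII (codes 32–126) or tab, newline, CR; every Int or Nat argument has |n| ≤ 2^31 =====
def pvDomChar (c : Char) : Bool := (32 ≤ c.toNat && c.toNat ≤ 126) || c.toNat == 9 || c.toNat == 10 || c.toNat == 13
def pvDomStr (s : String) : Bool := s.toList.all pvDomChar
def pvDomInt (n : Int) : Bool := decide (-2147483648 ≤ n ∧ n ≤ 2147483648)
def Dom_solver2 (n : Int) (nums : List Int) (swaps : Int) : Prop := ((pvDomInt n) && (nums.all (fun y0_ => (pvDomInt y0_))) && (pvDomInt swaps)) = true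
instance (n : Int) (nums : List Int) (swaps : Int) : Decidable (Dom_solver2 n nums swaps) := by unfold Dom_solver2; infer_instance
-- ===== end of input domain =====

-- B replaces A's repeated min/index/remove recursion by one sort of the indices by
-- (value, index) plus prefix counts; equivalence is about the RETURN value (both Pythons
-- also remove the n smallest elements from nums in place).

-- ===== PORT A =====
-- literal port of A; Python raises ValueError where min?/remove? return none (excluded by Pre_)
def solver2 (n : Int) (nums : List Int) (swaps : Int) : Int :=
  if n = 0 then swaps
  else
    match PySem.List.min? nums (fun x => x) with
    | none => swaps           -- Python: ValueError from min([]) — outside Pre_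
    | some smallest =>
      let smallestIdx : Int := ((PySem.List.index? nums smallest).getD 0 : Nat)
      let swaps' := swaps + min (smallestIdx - 0) ((n - 1) - smallestIdx)
      match hrem : PySem.List.remove? nums smallest with
      | none => swaps'        -- unreachable: smallest ∈ nums
      | some nums' => solver2 (n - 1) nums' swaps'
termination_by nums.length
decreasing_by
  have hmem : smallest ∈ nums := by
    by_contra hc
    rw [← PySem.List.remove?_eq_none_iff nums smallest] at hc
    simp [hc] at hrem
  rw [PySem.List.remove?_eq_some_erase nums smallest hmem] at hrem
  cases hrem
  have hpos : 0 < nums.length := List.length_pos_of_mem hmem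
  rw [List.length_erase_of_mem hmem]
  omega

-- ===== PORT B =====
-- literal port of Source B: order = sorted(range(m), key=lambda i: (nums[i], i)); picked = order[:n];
-- the loop over enumerate(picked) with sum(1 for j in picked[:t] if j < i) ported as countP
def solver2_alt (n : Int) (nums : List Int) (swaps : Int) : Int :=
  let m : Int := nums.length
  let order := PySem.List.sorted2 (PySem.List.pyRange 0 m 1)
      (fun i => PySem.List.pyGetD nums i 0) (fun i => i)
  let picked := PySem.List.slice order none (some n)
  (PySem.List.enumerate picked 0).foldl
    (fun total ti =>
      let cur : Int := ti.2 -
        ((PySem.List.slice picked none (some ti.1)).countP (fun j => decide (j < ti.2)) : Int)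
      total + min cur ((n - 1 - ti.1) - cur)) swaps

-- ===== PRECONDITION & SPEC =====
-- A returns normally exactly when 0 ≤ n ≤ len(nums); otherwise the recursion reaches min([]) = ValueError
def Pre_solver2 (n : Int) (nums : List Int) (swaps : Int) : Prop := 0 ≤ n ∧ n ≤ (nums.length : Int)
instance (n : Int) (nums : List Int) (swaps : Int) : Decidable (Pre_solver2 n nums swaps) := by unfold Pre_solver2; infer_instance
def pvWitness_solver2 : Int × List Int × Int := (3, ([2, 1, 3] : List Int), 0)

def Spec_solver2 (n : Int) (nums : List Int) (swaps : Int) (out : Int) : Prop := out = solver2_alt n nums swaps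
instance (n : Int) (nums : List Int) (swaps : Int) (out : Int) : Decidable (Spec_solver2 n nums swaps out) := by unfold Spec_solver2; infer_instance

-- ===== CLAIM (what is proved, stated in full; the proofs are below) =====
def Claim_equal_solver2 : Prop := ∀ (n : Int) (nums : List Int) (swaps : Int), Dom_solver2 n nums swaps → Pre_solver2 n nums swaps → Spec_solver2 n nums swaps (solver2 n nums swaps)

-- ===== LEMMAS AND PROOFS =====

def shiftI (i0 : Int) (j : Int) : Int := if i0 ≤ j then j + 1 else j

def costGo (n : Int) (t : Int) (prev : List Int) : List Int → Int
  | [] => 0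
  | i :: rest =>
    let cur : Int := i - (prev.countP (fun j => decide (j < i)) : Int)
    min cur ((n - 1 - t) - cur) + costGo n (t + 1) (prev ++ [i]) rest

def ordIdx (nums : List Int) : List Int :=
  PySem.List.sorted2 (PySem.List.pyRange 0 (nums.length : Int) 1)
    (fun i => PySem.List.pyGetD nums i 0) (fun i => i)

lemma shiftI_lt_iff (i0 a b : Int) : shiftI i0 a < shiftI i0 b ↔ a < b := by
  unfold shiftI; split_ifs <;> omega

lemma shiftI_inj (i0 : Int) : Function.Injective (shiftI i0) := by
  intro a b h
  unfold shiftI at h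
  split_ifs at h <;> omega

lemma shiftI_ne (i0 j : Int) : shiftI i0 j ≠ i0 := by
  unfold shiftI; split_ifs <;> omega

lemma pyRange_cast (a : Int) (k : Nat) :
    PySem.List.pyRange a (a + (k : Int)) 1 = (List.range k).map (fun (j : Nat) => a + (j : Int)) := by
  induction k generalizing a with
  | zero => simp [PySem.List.pyRange]
  | succ k ih =>
    have h1 : a < a + ((k + 1 : Nat) : Int) := by push_cast; omega
    rw [PySem.List.pyRange_one_cons h1]
    have h2 : a + ((k + 1 : Nat) : Int) = (a + 1) + (k : Int) := by push_cast; ring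
    rw [h2, ih (a + 1), List.range_succ_eq_map]
    rw [List.map_cons, List.map_map]
    refine List.cons_eq_cons.mpr ⟨by simp, List.map_congr_left (fun x _ => ?_)⟩
    simp only [Function.comp_apply]; push_cast; ring

lemma mem_pyRange_zero (m : Nat) (x : Int) :
    x ∈ PySem.List.pyRange 0 (m : Int) 1 ↔ 0 ≤ x ∧ x < (m : Int) := by
  have h : PySem.List.pyRange 0 (m : Int) 1 = (List.range m).map (fun (j : Nat) => (0 : Int) + (j : Int)) := by
    rw [← pyRange_cast]; norm_num
  rw [h]
  simp only [List.mem_map, List.mem_range]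
  constructor
  · rintro ⟨j, hj, rfl⟩; constructor <;> omega
  · rintro ⟨h0, h1⟩; exact ⟨x.toNat, by omega, by omega⟩

lemma nodup_pyRange_zero (m : Nat) : (PySem.List.pyRange 0 (m : Int) 1).Nodup := by
  have h : PySem.List.pyRange 0 (m : Int) 1 = (List.range m).map (fun (j : Nat) => (0 : Int) + (j : Int)) := by
    rw [← pyRange_cast]; norm_num
  rw [h]
  exact List.Nodup.map (fun x y hxy => by omega) (List.nodup_range)

lemma sorted2_eq_sorted_lex (xs : List Int) (k1 k2 : Int → Int) :
    PySem.List.sorted2 xs k1 k2 = PySem.List.sorted xs (fun a => toLex (k1 a, k2 a)) := by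
  have hb : (fun a b => decide (k1 a < k1 b) || (!decide (k1 b < k1 a) && decide (k2 a < k2 b)))
      = (fun a b : Int => decide (toLex (k1 a, k2 a) < toLex (k1 b, k2 b))) := by
    funext a b
    by_cases h1 : k1 a < k1 b <;> by_cases h2 : k1 b < k1 a <;> by_cases h3 : k2 a < k2 b <;>
      simp [Prod.Lex.lt_iff, h1, h2, h3] <;> omega
  show List.foldl (fun acc x => PySem.List.insertBy
      (fun a b => decide (k1 a < k1 b) || (!decide (k1 b < k1 a) && decide (k2 a < k2 b))) x acc) [] xs
    = List.foldl (fun acc x => PySem.List.insertBy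
      (fun a b => decide (toLex (k1 a, k2 a) < toLex (k1 b, k2 b))) x acc) [] xs
  rw [hb]

lemma fold_eq_costGo (n : Int) (picked : List Int) :
    ∀ (rest prev : List Int), picked = prev ++ rest → ∀ (acc : Int),
    (PySem.List.enumerate rest (prev.length : Int)).foldl
      (fun total ti =>
        let cur : Int := ti.2 -
          ((PySem.List.slice picked none (some ti.1)).countP (fun j => decide (j < ti.2)) : Int)
        total + min cur ((n - 1 - ti.1) - cur)) acc
    = acc + costGo n (prev.length : Int) prev rest := by
  intro rest
  induction rest with
  | nil => intro prev h acc; simp [costGo, PySem.List.enumerate]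
  | cons i rest ih =>
    intro prev h acc
    have h0 : (0:Int) ≤ (prev.length : Int) := Int.natCast_nonneg _
    have hsl : PySem.List.slice picked none (some (prev.length : Int)) = prev := by
      rw [PySem.List.slice_to picked h0, Int.toNat_natCast, h, List.take_left]
    rw [PySem.List.enumerate_cons, List.foldl_cons]
    simp only [hsl]
    have h' : picked = (prev ++ [i]) ++ rest := by rw [h, List.append_assoc]; rfl
    have hih := ih (prev ++ [i]) h' (acc + min (i - (prev.countP (fun j => decide (j < i)) : Int))
      ((n - 1 - (prev.length : Int)) - (i - (prev.countP (fun j => decide (j < i)) : Int))))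
    have hlen : (((prev ++ [i]).length : Nat) : Int) = (prev.length : Int) + 1 := by simp
    rw [hlen] at hih
    rw [hih]
    simp only [costGo]
    ring

lemma solver2_alt_eq_costGo (n : Int) (nums : List Int) (swaps : Int) (hn : 0 ≤ n) :
    solver2_alt n nums swaps = swaps + costGo n 0 [] ((ordIdx nums).take n.toNat) := by
  show (PySem.List.enumerate (PySem.List.slice (ordIdx nums) none (some n)) 0).foldl
    (fun total ti =>
      let cur : Int := ti.2 -
        ((PySem.List.slice (PySem.List.slice (ordIdx nums) none (some n)) none (some ti.1)).countP
          (fun j => decide (j < ti.2)) : Int)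
      total + min cur ((n - 1 - ti.1) - cur)) swaps
    = swaps + costGo n 0 [] ((ordIdx nums).take n.toNat)
  rw [PySem.List.slice_to _ hn]
  have := fold_eq_costGo n ((ordIdx nums).take n.toNat) ((ordIdx nums).take n.toNat) [] rfl swaps
  simpa using this

lemma costGo_shift (n i0 : Int) :
    ∀ (rest : List Int) (t : Int) (prev : List Int),
    costGo n (t + 1) (i0 :: prev.map (shiftI i0)) (rest.map (shiftI i0))
      = costGo (n - 1) t prev rest := by
  intro rest
  induction rest with
  | nil => intro t prev; simp [costGo]
  | cons j rest ih =>
    intro t prev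
    simp only [List.map_cons, costGo]
    have hcnt : List.countP (fun x => decide (x < shiftI i0 j)) (prev.map (shiftI i0))
        = List.countP (fun x => decide (x < j)) prev := by
      rw [List.countP_map]
      exact List.countP_congr (fun x _ => by simp [Function.comp, shiftI_lt_iff])
    have hcur : shiftI i0 j - ((i0 :: prev.map (shiftI i0)).countP (fun x => decide (x < shiftI i0 j)) : Int)
        = j - (prev.countP (fun x => decide (x < j)) : Int) := by
      rw [List.countP_cons, hcnt]
      unfold shiftI
      split_ifs with h1 h2 h2 <;> simp at * <;> omega
    rw [show (i0 :: prev.map (shiftI i0)) ++ [shiftI i0 j] = i0 :: (prev ++ [j]).map (shiftI i0) by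
      simp [List.map_append]]
    rw [ih (t + 1) (prev ++ [j])]
    rw [hcur]
    ring_nf

lemma getShift (nums : List Int) (i0 : Nat) (hi0 : i0 < nums.length) (j : Int)
    (h0 : 0 ≤ j) (h1 : j < (nums.length : Int) - 1) :
    PySem.List.pyGetD (nums.eraseIdx i0) j 0 = PySem.List.pyGetD nums (shiftI (i0 : Int) j) 0 := by
  have hlen : (nums.eraseIdx i0).length = nums.length - 1 := by
    rw [List.length_eraseIdx]; simp [hi0]
  by_cases hc : (i0 : Int) ≤ j
  · have hs : shiftI (i0 : Int) j = j + 1 := if_pos hc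
    rw [hs, PySem.List.pyGetD_eq_getElem (nums.eraseIdx i0) 0 h0 (by omega),
        PySem.List.pyGetD_eq_getElem nums 0 (by omega) (by omega)]
    rw [List.getElem_eraseIdx]
    rw [dif_neg (by omega)]
    congr 1
    omega
  · have hs : shiftI (i0 : Int) j = j := if_neg hc
    rw [hs, PySem.List.pyGetD_eq_getElem (nums.eraseIdx i0) 0 h0 (by omega),
        PySem.List.pyGetD_eq_getElem nums 0 h0 (by omega)]
    rw [List.getElem_eraseIdx]
    rw [dif_pos (by omega)]

lemma ordIdx_cons (nums : List Int) (s : Int) (i0 : Nat)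
    (hmin : PySem.List.min? nums (fun x => x) = some s)
    (hidx : PySem.List.index? nums s = some i0) :
    ordIdx nums = (i0 : Int) :: (ordIdx (nums.eraseIdx i0)).map (shiftI (i0 : Int)) := by
  obtain ⟨hi0lt, hget, hfirst⟩ := PySem.List.getElem_of_index?_eq_some hidx
  have hsmin : ∀ y ∈ nums, s ≤ y := PySem.List.min?_isMin hmin
  set l := ordIdx (nums.eraseIdx i0) with hldef
  have hlen' : (nums.eraseIdx i0).length = nums.length - 1 := by
    rw [List.length_eraseIdx]; simp [hi0lt]
  have hperm' : l.Perm (PySem.List.pyRange 0 ((nums.eraseIdx i0).length : Int) 1) :=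
    PySem.List.sorted2_perm _ _ _ _
  have hl_mem : ∀ j, j ∈ l ↔ (0 ≤ j ∧ j < (nums.length : Int) - 1) := by
    intro j
    rw [hperm'.mem_iff, mem_pyRange_zero]
    constructor <;> rintro ⟨a, b⟩ <;> refine ⟨a, ?_⟩ <;> [skip; skip] <;> omega
  have hl_nodup : l.Nodup :=
    hperm'.nodup_iff.mpr (nodup_pyRange_zero _)
  -- strict pairwise on l w.r.t. the lex key of nums.eraseIdx i0
  have hl_sorted : l = PySem.List.sorted (PySem.List.pyRange 0 ((nums.eraseIdx i0).length : Int) 1)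
      (fun i => toLex (PySem.List.pyGetD (nums.eraseIdx i0) i 0, i)) := by
    rw [hldef, ordIdx, sorted2_eq_sorted_lex]
  have hp_le : l.Pairwise (fun a b =>
      (fun i => toLex (PySem.List.pyGetD (nums.eraseIdx i0) i 0, i)) a ≤
      (fun i => toLex (PySem.List.pyGetD (nums.eraseIdx i0) i 0, i)) b) := by
    rw [hl_sorted]; exact PySem.List.sorted_pairwise _ _
  have hp_lt : l.Pairwise (fun a b =>
      toLex (PySem.List.pyGetD (nums.eraseIdx i0) a 0, a) <
      toLex (PySem.List.pyGetD (nums.eraseIdx i0) b 0, b)) := by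
    refine (hp_le.and hl_nodup).imp ?_
    rintro a b ⟨hle, hne⟩
    refine lt_of_le_of_ne hle ?_
    intro he
    exact hne (congrArg (fun x => (ofLex x).2) he)
  -- now the uniqueness characterisation
  rw [ordIdx, sorted2_eq_sorted_lex]
  apply PySem.List.sorted_eq_of_perm_of_pairwise_lt
  · -- permutation
    rw [List.perm_ext_iff_of_nodup ?_ (nodup_pyRange_zero nums.length)]
    · intro a
      simp only [List.mem_cons, List.mem_map, mem_pyRange_zero]
      constructor
      · rintro (rfl | ⟨j, hj, rfl⟩)
        · constructor <;> omega
        · have := (hl_mem j).mp hj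
          unfold shiftI; split_ifs <;> omega
      · rintro ⟨h0, h1⟩
        by_cases ha : a = (i0 : Int)
        · exact Or.inl ha
        · right
          by_cases hlt : a < (i0 : Int)
          · exact ⟨a, (hl_mem a).mpr ⟨h0, by omega⟩, by unfold shiftI; rw [if_neg (by omega)]⟩
          · exact ⟨a - 1, (hl_mem (a - 1)).mpr ⟨by omega, by omega⟩,
              by unfold shiftI; rw [if_pos (by omega)]; omega⟩
    · exact List.nodup_cons.mpr ⟨fun hmem => by
        obtain ⟨j, _, hj⟩ := List.mem_map.mp hmem
        exact shiftI_ne (i0 : Int) j hj,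
        List.Nodup.map (shiftI_inj (i0 : Int)) hl_nodup⟩
  · -- pairwise strictly increasing lex key
    refine List.pairwise_cons.mpr ⟨?_, ?_⟩
    · intro y hy
      obtain ⟨j, hj, rfl⟩ := List.mem_map.mp hy
      obtain ⟨hj0, hj1⟩ := (hl_mem j).mp hj
      have hvi0 : PySem.List.pyGetD nums ((i0 : Nat) : Int) 0 = s := by
        rw [PySem.List.pyGetD_eq_getElem nums 0 (by omega) (by omega)]
        simpa using hget
      have hsb : 0 ≤ shiftI (i0 : Int) j ∧ shiftI (i0 : Int) j < (nums.length : Int) := by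
        unfold shiftI; split_ifs <;> omega
      have hvy_mem : PySem.List.pyGetD nums (shiftI (i0 : Int) j) 0 ∈ nums := by
        rw [PySem.List.pyGetD_eq_getElem nums 0 hsb.1 hsb.2]
        exact List.getElem_mem _
      have hle := hsmin _ hvy_mem
      rw [Prod.Lex.lt_iff]
      simp only [ofLex_toLex]
      rw [hvi0]
      rcases lt_or_eq_of_le hle with hlt | heq
      · exact Or.inl hlt
      · refine Or.inr ⟨heq, ?_⟩
        rcases lt_trichotomy ((i0 : Int)) (shiftI (i0 : Int) j) with h | h | h
        · exact h
        · exact absurd h.symm (shiftI_ne (i0 : Int) j)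
        · exfalso
          have hsj : shiftI (i0 : Int) j = j := by unfold shiftI at h ⊢; split_ifs at * <;> omega
          have hjlt : j.toNat < i0 := by omega
          apply hfirst j.toNat (by omega)
          have : PySem.List.pyGetD nums j 0 = nums[j.toNat]'(by omega) :=
            PySem.List.pyGetD_eq_getElem nums 0 (by omega) (by omega)
          rw [← this, ← hsj, ← heq]
    · rw [List.pairwise_map]
      refine hp_lt.imp_of_mem ?_
      intro a b ha hb hab
      obtain ⟨ha0, ha1⟩ := (hl_mem a).mp ha
      obtain ⟨hb0, hb1⟩ := (hl_mem b).mp hb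
      have hga := getShift nums i0 hi0lt a ha0 ha1
      have hgb := getShift nums i0 hi0lt b hb0 hb1
      rw [Prod.Lex.lt_iff] at hab ⊢
      simp only [ofLex_toLex] at hab ⊢
      rw [← hga, ← hgb]
      rcases hab with h | ⟨heq, hlt⟩
      · exact Or.inl h
      · exact Or.inr ⟨heq, (shiftI_lt_iff _ _ _).mpr hlt⟩

lemma solver2_eq_costGo :
    ∀ (m : Nat) (nums : List Int) (n swaps : Int), nums.length = m →
    0 ≤ n → n ≤ (m : Int) →
    solver2 n nums swaps = swaps + costGo n 0 [] ((ordIdx nums).take n.toNat) := by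
  intro m
  induction m with
  | zero =>
    intro nums n swaps hlen h0 h1
    have hn : n = 0 := by omega
    rw [solver2, if_pos hn, hn]
    simp [costGo]
  | succ k ih =>
    intro nums n swaps hlen h0 h1
    by_cases hn : n = 0
    · rw [solver2, if_pos hn, hn]
      simp [costGo]
    · have hne : nums ≠ [] := by intro h; rw [h] at hlen; simp at hlen
      obtain ⟨s, hmin⟩ : ∃ s, PySem.List.min? nums (fun x => x) = some s := by
        cases hm : PySem.List.min? nums (fun x => x) with
        | none => exact absurd ((PySem.List.min?_eq_none_iff nums _).mp hm) hne
        | some s => exact ⟨s, rfl⟩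
      have hsmem : s ∈ nums := PySem.List.min?_mem hmin
      have hsome : (PySem.List.index? nums s).isSome :=
        (PySem.List.index?_isSome_iff nums s).mpr hsmem
      obtain ⟨i0, hidx⟩ := Option.isSome_iff_exists.mp hsome
      obtain ⟨hi0lt, hget, hfirst⟩ := PySem.List.getElem_of_index?_eq_some hidx
      have hrem : PySem.List.remove? nums s = some (nums.eraseIdx i0) := by
        rw [PySem.List.remove?_eq_some_erase nums s hsmem]
        congr 1
        rw [List.erase_eq_eraseIdx]
        rw [show List.idxOf? s nums = some i0 from by
          rw [← PySem.List.index?_eq_idxOf?]; exact hidx]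
      have hlen' : (nums.eraseIdx i0).length = k := by
        rw [List.length_eraseIdx]; simp [hi0lt]; omega
      have hih := ih (nums.eraseIdx i0) (n - 1)
        (swaps + min ((i0 : Int) - 0) ((n - 1) - (i0 : Int))) hlen' (by omega) (by omega)
      rw [solver2, if_neg hn, hmin]
      simp only [hidx, Option.getD_some]
      split
      next habs => simp [habs] at hrem
      next nums2 heq =>
        rw [heq] at hrem
        injection hrem with hrem'
        subst hrem'
        rw [hih]
        rw [ordIdx_cons nums s i0 hmin hidx]
        have htake : ((i0 : Int) :: (ordIdx (nums.eraseIdx i0)).map (shiftI (i0 : Int))).take n.toNat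
            = (i0 : Int) :: ((ordIdx (nums.eraseIdx i0)).take (n - 1).toNat).map (shiftI (i0 : Int)) := by
          rw [show n.toNat = (n - 1).toNat + 1 by omega, List.take_succ_cons, List.map_take]
        rw [htake]
        simp only [costGo, List.countP_nil, Nat.cast_zero, sub_zero, List.nil_append]
        rw [show ((i0 : Int) :: List.nil = (i0 : Int) :: (List.map (shiftI (i0:Int)) [])) from by simp]
        rw [show (0 : Int) + 1 = 0 + 1 from rfl]
        rw [costGo_shift n (i0 : Int) _ 0 []]
        ring_nf

-- ===== VERDICT (by name: the statement is the Claim_ definition above) =====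
theorem solver2_spec : Claim_equal_solver2 := by
  intro n nums swaps _ hpre
  unfold Spec_solver2
  rw [solver2_eq_costGo nums.length nums n swaps rfl hpre.1 hpre.2,
      solver2_alt_eq_costGo n nums swaps hpre.1]
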